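-- pv_equiv track=rewrite | github.com/msf235/chunk-memo | shard_memo/memo.py | _indices_step
-- ===== SOURCE A (Python) =====
-- def _indices_step(indices: list[int]) -> int | None:
--     if len(indices) < 2:
--         return 1
--     step = indices[1] - indices[0]
--     if step == 0:
--         return None
--     for prev, current in zip(indices, indices[1:]):
--         if current - prev != step:
--             return None
--     return step
-- ===== SOURCE B (Python) =====
-- def _indices_step(indices: list[int]) -> int | None:
--     if len(indices) < 2:
--         return 1
--     step = indices[1] - indices[0]
--     if step == 0:
--         return None
--     expected = list(range(indices[0], indices[0] + step * len(indices), step))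
--     return step if indices == expected else None
-- ===== Notes on version B (the rewrite author's own statement) =====
-- stated objective: alternative
-- what changed: Replaces the consecutive-difference scan over zipped pairs with reconstructing the full expected arithmetic progression via range() and a single list equality comparison.
import Mathlib
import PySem

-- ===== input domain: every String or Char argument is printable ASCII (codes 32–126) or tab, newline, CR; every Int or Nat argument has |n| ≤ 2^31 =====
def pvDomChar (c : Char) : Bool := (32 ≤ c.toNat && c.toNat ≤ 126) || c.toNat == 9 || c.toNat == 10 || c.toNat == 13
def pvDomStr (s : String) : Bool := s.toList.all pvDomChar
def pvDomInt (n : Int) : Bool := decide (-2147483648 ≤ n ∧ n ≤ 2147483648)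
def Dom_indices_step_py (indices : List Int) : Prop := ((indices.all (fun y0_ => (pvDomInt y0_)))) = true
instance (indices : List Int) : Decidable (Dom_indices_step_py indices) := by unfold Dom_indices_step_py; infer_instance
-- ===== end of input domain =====

-- B replaces A's pairwise consecutive-difference scan by rebuilding the expected
-- arithmetic progression with range() and comparing lists (objective: alternative).

-- ===== PORT A =====
def indices_step_py (indices : List Int) : Option Int :=
  if indices.length < 2 then some 1
  else
    let step := PySem.List.pyGetD indices 1 0 - PySem.List.pyGetD indices 0 0
    if step = 0 then none
    else if (indices.zip (PySem.List.slice indices (some 1) none)).all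
              (fun pc => pc.2 - pc.1 == step)
    then some step else none

-- ===== PORT B =====
def indices_step_py_alt (indices : List Int) : Option Int :=
  if indices.length < 2 then some 1
  else
    let step := PySem.List.pyGetD indices 1 0 - PySem.List.pyGetD indices 0 0
    if step = 0 then none
    else
      let start := PySem.List.pyGetD indices 0 0
      let expected := PySem.List.pyRange start (start + step * indices.length) step
      if indices = expected then some step else none

-- ===== PRECONDITION & SPEC =====
def Spec_indices_step_py (indices : List Int) (out : Option Int) : Prop := out = indices_step_py_alt indices
instance (indices : List Int) (out : Option Int) : Decidable (Spec_indices_step_py indices out) := by unfold Spec_indices_step_py; infer_instance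

-- ===== CLAIM (what is proved, stated in full; the proofs are below) =====
def Claim_equal_indices_step_py : Prop := ∀ (indices : List Int), Dom_indices_step_py indices → Spec_indices_step_py indices (indices_step_py indices)

-- ===== LEMMAS AND PROOFS =====

-- the count computed by pyRange for an exact multiple of the step
lemma pv_count_exact (t : Int) (n : Nat) (ht : 0 < t) :
    ((t * (n : Int) + t - 1) / t).toNat = n := by
  have h1 : (t * (n : Int) + t - 1) = (t - 1) + t * n := by ring
  rw [h1, Int.add_mul_ediv_left _ _ (by omega), Int.ediv_eq_zero_of_lt (by omega) (by omega)]
  omega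

-- pyRange over an exact arithmetic span is the length-n arithmetic progression
lemma pv_pyRange_arith (a step : Int) (n : Nat) (h : step ≠ 0) :
    PySem.List.pyRange a (a + step * n) step
      = (List.range n).map (fun k : Nat => a + step * (k : Int)) := by
  unfold PySem.List.pyRange
  simp only [if_neg h]
  rcases lt_or_gt_of_ne h with hneg | hpos
  · rw [if_neg (by omega)]
    rcases Nat.eq_zero_or_pos n with h0 | h0
    · subst h0; simp
    · have hlt : a + step * n < a := by nlinarith [Int.natCast_pos.mpr h0]
      rw [if_pos hlt]
      have he : a - (a + step * ↑n) + -step - 1 = -step * ↑n + -step - 1 := by ring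
      rw [he, pv_count_exact (-step) n (by omega)]
  · rw [if_pos hpos]
    rcases Nat.eq_zero_or_pos n with h0 | h0
    · subst h0; simp
    · have hlt : a < a + step * n := by nlinarith [Int.natCast_pos.mpr h0]
      rw [if_pos hlt]
      have he : a + step * ↑n - a + step - 1 = step * ↑n + step - 1 := by ring
      rw [he, pv_count_exact step n hpos]

-- all consecutive differences equal step ⟺ the list IS the arithmetic progression
lemma pv_chain_iff (step : Int) : ∀ (a : Int) (xs : List Int),
    (((a :: xs).zip xs).all (fun pc => pc.2 - pc.1 == step)) = true
      ↔ a :: xs = (List.range (xs.length + 1)).map (fun k : Nat => a + step * (k : Int)) := by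
  intro a xs
  induction xs generalizing a with
  | nil => simp
  | cons b rest ih =>
    simp only [List.zip_cons_cons, List.all_cons, Bool.and_eq_true, beq_iff_eq]
    rw [ih b]
    constructor
    · rintro ⟨hab, hrest⟩
      have hb : b = a + step := by omega
      subst hb
      rw [List.length_cons, List.range_succ_eq_map, List.map_cons, List.map_map]
      simp only [Nat.cast_zero, mul_zero, add_zero]
      congr 1
      rw [hrest]
      apply List.map_congr_left
      intro k _
      simp only [Function.comp_apply, Nat.succ_eq_add_one]
      push_cast
      ring
    · intro h
      rw [List.length_cons, List.range_succ_eq_map, List.map_cons, List.map_map] at h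
      simp only [Nat.cast_zero, mul_zero, add_zero, List.cons.injEq] at h
      rcases h with ⟨ha, hrest⟩
      have hb : b = a + step := by
        have := congrArg (fun l => l.head?) hrest
        rcases rest.length.eq_zero_or_pos with h0 | h0
        · -- rest = []
          have hre : rest = [] := List.length_eq_zero_iff.mp h0
          subst hre
          simp [List.range_succ_eq_map] at hrest
          omega
        · rw [List.range_succ_eq_map] at hrest
          simp at hrest
          omega
      subst hb
      refine ⟨by ring, ?_⟩
      rw [hrest]
      apply List.map_congr_left
      intro k _
      simp only [Function.comp_apply, Nat.succ_eq_add_one]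
      push_cast
      ring

-- ===== VERDICT (by name: the statement is the Claim_ definition above) =====
theorem indices_step_py_spec : Claim_equal_indices_step_py := by
  intro indices _
  unfold Spec_indices_step_py indices_step_py indices_step_py_alt
  match indices with
  | [] => decide
  | [a] => norm_num
  | a :: b :: rest =>
    have hget1 : PySem.List.pyGetD (a :: b :: rest) 1 0 = b := by
      have : ((1 : Nat) : Int) = (1 : Int) := by norm_num
      rw [← this, PySem.List.pyGetD_natCast]
      rfl
    have hget0 : PySem.List.pyGetD (a :: b :: rest) 0 0 = a := by
      have : ((0 : Nat) : Int) = (0 : Int) := by norm_num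
      rw [← this, PySem.List.pyGetD_natCast]
      rfl
    have hlt : ¬((a :: b :: rest).length < 2) := by simp
    simp only [if_neg hlt, hget1, hget0]
    by_cases hstep : b - a = 0
    · rw [if_pos hstep, if_pos hstep]
    · rw [if_neg hstep, if_neg hstep]
      have hslice : PySem.List.slice (a :: b :: rest) (some 1) none = b :: rest := by
        rw [PySem.List.slice_from _ (by norm_num)]
        rfl
      rw [hslice]
      simp only [List.length_cons]
      simp only [pv_pyRange_arith a (b - a) (rest.length + 1 + 1) hstep]
      have hchain := pv_chain_iff (b - a) a (b :: rest)
      simp only [List.length_cons] at hchain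
      by_cases hall : (((a :: b :: rest).zip (b :: rest)).all (fun pc => pc.2 - pc.1 == (b - a))) = true
      · rw [if_pos hall, if_pos (hchain.mp hall)]
      · rw [if_neg hall, if_neg (fun hc => hall (hchain.mpr hc))]
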